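-- pv_equiv track=rewrite | github.com/wongwh2002/ModsWithFriends | csp/csp_timetable.py | has_consecutive_slots
-- ===== SOURCE A (Python) =====
-- def has_consecutive_slots(arr: list[bool], n: int) -> bool:
--     """Checks if the given list has at least n consecutive False values.
--
--     Args:
--         arr (list[bool]): List to iterate through
--         n (int): Number of consecutive slots to check for
--
--     Returns:
--         bool
--     """
--
--     if len(arr) < n:
--         return False
--
--     if not arr:
--         return False
--
--     counter = 0
--     for val in arr:
--         if val == True:
--             counter = 0
--         else:
--             counter += 1
--         if counter >= n:
--             return True
--
--     return False
-- ===== SOURCE B (Python) =====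
-- def has_consecutive_slots(arr: list[bool], n: int) -> bool:
--     """Checks if the given list has at least n consecutive False values."""
--     if len(arr) < n:
--         return False
--     if not arr:
--         return False
--     if n <= 0:
--         return True  # a run of length <= 0 exists trivially in a nonempty list
--     prefix = [0]
--     total = 0
--     for v in arr:
--         total += 1 if v else 0
--         prefix.append(total)
--     # n consecutive False starting at i  <=>  no True among positions i..i+n-1
--     return any(prefix[i + n] - prefix[i] == 0 for i in range(len(arr) - n + 1))
-- ===== Notes on version B (the rewrite author's own statement) =====
-- stated objective: alternative
-- what changed: Replaces the running reset-counter with prefix sums of True-counts built in one pass, then checks whether any window of n slots has equal prefix sums at its ends (i.e. contains no True).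
import Mathlib
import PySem

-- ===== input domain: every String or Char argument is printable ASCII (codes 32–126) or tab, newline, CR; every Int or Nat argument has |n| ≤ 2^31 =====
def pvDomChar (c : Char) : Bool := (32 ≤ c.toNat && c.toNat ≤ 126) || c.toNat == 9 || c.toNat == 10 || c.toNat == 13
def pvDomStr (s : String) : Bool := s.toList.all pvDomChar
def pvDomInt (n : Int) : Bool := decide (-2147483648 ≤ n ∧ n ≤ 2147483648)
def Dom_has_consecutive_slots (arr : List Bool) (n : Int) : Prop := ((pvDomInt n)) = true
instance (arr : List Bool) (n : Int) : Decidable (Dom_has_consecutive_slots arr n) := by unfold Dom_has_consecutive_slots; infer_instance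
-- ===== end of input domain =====

-- B replaces A's running reset-counter with prefix sums of True-counts: a window of n slots is all False iff the prefix sums at its two ends are equal; alternative single-pass algorithm, same cost.


-- ===== PORT A =====
-- the 'for val in arr' loop with its running counter and early 'return True'
def hcsLoopA (n : Int) : List Bool → Int → Bool
  | [], _ => false
  | v :: rest, counter =>
    let c := if v = true then 0 else counter + 1
    if n ≤ c then true else hcsLoopA n rest c

def has_consecutive_slots (arr : List Bool) (n : Int) : Bool :=
  if (arr.length : Int) < n then false
  else if arr = [] then false
  else hcsLoopA n arr 0

-- ===== PORT B =====
-- the 'for v in arr' loop building the prefix list of running True-counts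
def hcsPrefix : List Bool → Int → List Int → List Int
  | [], _, acc => acc
  | v :: vs, total, acc =>
    let t := total + (if v then 1 else 0)
    hcsPrefix vs t (acc ++ [t])

def has_consecutive_slots_alt (arr : List Bool) (n : Int) : Bool :=
  if (arr.length : Int) < n then false
  else if arr = [] then false
  else if n ≤ 0 then true
  else
    let pre := hcsPrefix arr 0 [0]
    -- 'any(prefix[i+n] - prefix[i] == 0 for i in range(len(arr) - n + 1))';
    -- here 0 ≤ i ≤ len-n and 1 ≤ n, so both indices are in range and pyGetD is exact
    (PySem.List.pyRange 0 ((arr.length : Int) - n + 1) 1).any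
      (fun i => (PySem.List.pyGetD pre (i + n) 0 - PySem.List.pyGetD pre i 0) == 0)

-- ===== PRECONDITION & SPEC =====
def Spec_has_consecutive_slots (arr : List Bool) (n : Int) (out : Bool) : Prop := out = has_consecutive_slots_alt arr n
instance (arr : List Bool) (n : Int) (out : Bool) : Decidable (Spec_has_consecutive_slots arr n out) := by unfold Spec_has_consecutive_slots; infer_instance

-- ===== CLAIM (what is proved, stated in full; the proofs are below) =====
def Claim_equal_has_consecutive_slots : Prop := ∀ (arr : List Bool) (n : Int), Dom_has_consecutive_slots arr n → Spec_has_consecutive_slots arr n (has_consecutive_slots arr n)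

-- ===== LEMMAS AND PROOFS =====

-- number of True entries, as an Int
def hcsCnt (l : List Bool) : Int := (l.countP (fun b => b) : Int)

-- every entry is False
def hcsAllF (l : List Bool) : Prop := ∀ b ∈ l, b = false

-- some window of N consecutive entries is all False
def hcsWin (arr : List Bool) (N : Nat) : Prop :=
  ∃ i : Nat, i + N ≤ arr.length ∧ hcsAllF ((arr.drop i).take N)

theorem hcsCnt_cons (v : Bool) (l : List Bool) :
    hcsCnt (v :: l) = (if v then 1 else 0) + hcsCnt l := by
  cases v
  · simp [hcsCnt]
  · simp [hcsCnt]
    omega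

theorem hcsCnt_append (l₁ l₂ : List Bool) :
    hcsCnt (l₁ ++ l₂) = hcsCnt l₁ + hcsCnt l₂ := by
  simp [hcsCnt, List.countP_append]

theorem hcsCnt_eq_zero_iff (l : List Bool) : hcsCnt l = 0 ↔ hcsAllF l := by
  simp [hcsCnt, hcsAllF, List.countP_eq_zero]

theorem hcsPrefix_eq (arr : List Bool) : ∀ (total : Int) (acc : List Int),
    hcsPrefix arr total acc
      = acc ++ (List.range arr.length).map (fun k => total + hcsCnt (arr.take (k + 1))) := by
  induction arr with
  | nil => intro total acc; simp [hcsPrefix]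
  | cons v vs ih =>
    intro total acc
    simp only [hcsPrefix]
    rw [ih, List.append_assoc]
    congr 1
    rw [List.length_cons, List.range_succ_eq_map, List.map_cons, List.map_map,
      List.singleton_append, List.cons_eq_cons]
    constructor
    · simp [hcsCnt]
    · apply List.map_congr_left
      intro k _
      simp only [Function.comp_apply, List.take_succ_cons, hcsCnt_cons]
      ring

theorem hcsPre_eq (arr : List Bool) :
    hcsPrefix arr 0 [0]
      = (List.range (arr.length + 1)).map (fun k => hcsCnt (arr.take k)) := by
  rw [hcsPrefix_eq, List.range_succ_eq_map]
  simp [List.map_map, Function.comp, hcsCnt]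

theorem hcsAllF_take_mono {l : List Bool} {m k : Nat} (h : hcsAllF (l.take m)) (hk : k ≤ m) :
    hcsAllF (l.take k) := by
  intro b hb
  apply h
  have h2 : l.take k = (l.take m).take k := by rw [List.take_take, Nat.min_eq_left hk]
  rw [h2] at hb
  exact List.mem_of_mem_take hb

theorem hcsWin_cons (v : Bool) (vs : List Bool) (N : Nat) :
    hcsWin (v :: vs) N ↔ (N ≤ vs.length + 1 ∧ hcsAllF ((v :: vs).take N)) ∨ hcsWin vs N := by
  constructor
  · rintro ⟨i, hle, hall⟩
    cases i with
    | zero => exact Or.inl ⟨by simpa using hle, by simpa using hall⟩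
    | succ j => exact Or.inr ⟨j, by simp only [List.length_cons] at hle; omega, by simpa using hall⟩
  · rintro (⟨hle, hall⟩ | ⟨j, hle, hall⟩)
    · exact ⟨0, by simpa using hle, by simpa using hall⟩
    · exact ⟨j + 1, by simp only [List.length_cons]; omega, by simpa using hall⟩

-- A's loop from counter c finds n consecutive Falses iff the list starts with (n-c) Falses
-- or some full window of n Falses occurs
theorem hcsLoopA_iff (n : Int) (hn : 0 < n) : ∀ (arr : List Bool) (c : Int), 0 ≤ c → c < n →
    (hcsLoopA n arr c = true ↔
      ((n - c).toNat ≤ arr.length ∧ hcsAllF (arr.take (n - c).toNat)) ∨ hcsWin arr n.toNat) := by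
  intro arr
  induction arr with
  | nil =>
    intro c hc0 hcn
    simp only [hcsLoopA, List.length_nil]
    constructor
    · intro h; exact absurd h (by simp)
    · rintro (⟨hle, _⟩ | ⟨i, hle, _⟩)
      · omega
      · simp only [List.length_nil] at hle
        omega
  | cons v vs ih =>
    intro c hc0 hcn
    cases v with
    | true =>
      have h1 : ¬ n ≤ (0 : Int) := by omega
      simp only [hcsLoopA, if_true, if_neg h1]
      rw [ih 0 le_rfl hn, hcsWin_cons]
      constructor
      · rintro (⟨hle, hall⟩ | hwin)
        · exact Or.inr (Or.inr ⟨0, by simp; omega, by simpa using hall⟩)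
        · exact Or.inr (Or.inr hwin)
      · rintro (⟨hle, hall⟩ | ⟨hle, hall⟩ | hwin)
        · -- prefix of true::vs all false: impossible, head is true
          exfalso
          have : (true : Bool) ∈ (true :: vs).take (n - c).toNat := by
            have : 0 < (n - c).toNat := by omega
            cases h : (n - c).toNat with
            | zero => omega
            | succ m => simp
          simpa using hall true this
        · exfalso
          have : (true : Bool) ∈ (true :: vs).take n.toNat := by
            have : 0 < n.toNat := by omega
            cases h : n.toNat with
            | zero => omega
            | succ m => simp
          simpa using hall true this
        · exact Or.inr hwin
    | false =>
      simp only [hcsLoopA, Bool.false_eq_true, if_neg (by simp : ¬ False)]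
      by_cases hstop : n ≤ c + 1
      · have hnc : n = c + 1 := by omega
        rw [if_pos hstop]
        constructor
        · intro _
          refine Or.inl ⟨by simp; omega, ?_⟩
          have : (n - c).toNat = 1 := by omega
          rw [this]
          intro b hb; simpa using hb
        · intro _; rfl
      · rw [if_neg hstop]
        rw [ih (c + 1) (by omega) (by omega), hcsWin_cons]
        have hm : (n - (c + 1)).toNat + 1 = (n - c).toNat := by omega
        have hpre : ∀ m : Nat, hcsAllF ((false :: vs).take (m + 1)) ↔ hcsAllF (vs.take m) := by
          intro m
          constructor
          · intro h b hb; exact h b (by simp [hb])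
          · intro h b hb
            simp only [List.take_succ_cons, List.mem_cons] at hb
            rcases hb with rfl | hb
            · rfl
            · exact h b hb
        constructor
        · rintro (⟨hle, hall⟩ | hwin)
          · refine Or.inl ⟨by simp; omega, ?_⟩
            rw [← hm, hpre]; exact hall
          · exact Or.inr (Or.inr hwin)
        · rintro (⟨hle, hall⟩ | ⟨hle, hall⟩ | hwin)
          · refine Or.inl ⟨by simp at hle; omega, ?_⟩
            rw [← hm, hpre] at hall; exact hall
          · -- a prefix of n Falses gives a prefix of n-c-1 ≤ n-1 Falses of the tail
            refine Or.inl ⟨by omega, ?_⟩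
            have h1 : hcsAllF (vs.take (n.toNat - 1)) := by
              rw [← hpre]
              have : n.toNat - 1 + 1 = n.toNat := by omega
              rw [this]; exact hall
            exact hcsAllF_take_mono h1 (by omega)
          · exact Or.inr hwin

-- B's window test at Int index i, via the prefix-sum characterisation
theorem hcsB_window (arr : List Bool) (n : Int) (hn : 0 < n) (j : Nat)
    (hile : j + n.toNat ≤ arr.length) :
    (PySem.List.pyGetD (hcsPrefix arr 0 [0]) ((j : Int) + n) 0
        - PySem.List.pyGetD (hcsPrefix arr 0 [0]) (j : Int) 0 = 0)
      ↔ hcsAllF ((arr.drop j).take n.toNat) := by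
  rw [hcsPre_eq]
  have hidx : ∀ k : Nat, k < arr.length + 1 →
      PySem.List.pyGetD ((List.range (arr.length + 1)).map (fun k => hcsCnt (arr.take k))) (k : Int) 0
        = hcsCnt (arr.take k) := by
    intro k hk
    rw [PySem.List.pyGetD_natCast]
    rw [List.getD_eq_getElem?_getD]
    simp [hk]
  have e1 : (j : Int) + n = ((j + n.toNat : Nat) : Int) := by push_cast; omega
  rw [e1, hidx _ (by omega), hidx _ (by omega)]
  rw [List.take_add, hcsCnt_append]
  rw [show hcsCnt (arr.take j) + hcsCnt ((arr.drop j).take n.toNat) - hcsCnt (arr.take j)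
        = hcsCnt ((arr.drop j).take n.toNat) by ring]
  exact hcsCnt_eq_zero_iff _

theorem hcsB_iff (arr : List Bool) (n : Int) (hn : 0 < n) (hlen : n ≤ (arr.length : Int)) :
    ((PySem.List.pyRange 0 ((arr.length : Int) - n + 1) 1).any
        (fun i => (PySem.List.pyGetD (hcsPrefix arr 0 [0]) (i + n) 0
                    - PySem.List.pyGetD (hcsPrefix arr 0 [0]) i 0) == 0) = true)
      ↔ hcsWin arr n.toNat := by
  rw [List.any_eq_true]
  constructor
  · rintro ⟨i, hmem, hp⟩
    rw [PySem.List.mem_pyRange_one] at hmem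
    obtain ⟨hi0, hilt⟩ := hmem
    rw [beq_iff_eq, show i = ((i.toNat : Nat) : Int) by omega] at hp
    refine ⟨i.toNat, by omega, (hcsB_window arr n hn i.toNat (by omega)).mp hp⟩
  · rintro ⟨j, hle, hall⟩
    refine ⟨(j : Int), ?_, ?_⟩
    · rw [PySem.List.mem_pyRange_one]
      constructor
      · positivity
      · omega
    · rw [beq_iff_eq, hcsB_window arr n hn j (by omega)]
      simpa using hall

-- ===== VERDICT (by name: the statement is the Claim_ definition above) =====
theorem has_consecutive_slots_spec : Claim_equal_has_consecutive_slots := by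
  intro arr n _
  unfold Spec_has_consecutive_slots has_consecutive_slots has_consecutive_slots_alt
  by_cases hlen : (arr.length : Int) < n
  · simp [hlen]
  · simp only [if_neg hlen]
    cases arr with
    | nil => simp
    | cons v vs =>
      simp only [if_neg (by simp : ¬ (v :: vs) = [])]
      by_cases hn : n ≤ 0
      · -- n ≤ 0 and the list is nonempty: both return True
        rw [if_pos hn]
        simp only [hcsLoopA]
        cases v
        · simp
          omega
        · simp
          omega
      · rw [if_neg hn]
        have hn' : 0 < n := by omega
        have hA := hcsLoopA_iff n hn' (v :: vs) 0 le_rfl hn'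
        have hB := hcsB_iff (v :: vs) n hn' (by omega)
        simp only [sub_zero] at hA
        -- a prefix of n Falses is the window at position 0
        have hA' : hcsLoopA n (v :: vs) 0 = true ↔ hcsWin (v :: vs) n.toNat := by
          rw [hA]
          constructor
          · rintro (⟨hle, hall⟩ | hwin)
            · exact ⟨0, by simpa using hle, by simpa using hall⟩
            · exact hwin
          · exact Or.inr
        rw [Bool.eq_iff_iff, hA', hB]
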